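-- pv_equiv track=rewrite | github.com/MetalTurtle18/advent-of-code | 2025/solution_06.py | part1
-- ===== SOURCE A (Python) =====
-- def part1(data):
--     total = 0
--     problems = list(map(lambda p: p.split(), data[:-1]))
--     operations = data[len(data) - 1].split()
--     for problem in range(len(problems[0])):
--         mult = operations[problem] == "*"
--         ans = 1 if mult else 0
--         for item in problems:
--             if mult:
--                 ans *= int(item[problem])
--             else:
--                 ans += int(item[problem])
--         total += ans
--     return total
-- ===== SOURCE B (Python) =====
-- def part1(data):
--     rows = [line.split() for line in data[:-1]]
--     ops = data[-1].split()
--     # single row-major pass: a vector of per-column accumulators, seeded by operator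
--     acc = [1 if op == "*" else 0 for op in ops[:len(rows[0])]]
--     for row in rows:
--         acc = [a * int(x) if op == "*" else a + int(x)
--                for a, (op, x) in zip(acc, zip(ops, row))]
--     return sum(acc)
-- ===== Notes on version B (the rewrite author's own statement) =====
-- stated objective: alternative
-- what changed: B replaces A's column-major nested loops (outer loop over column indices, inner loop over rows with indexed item[problem] reads) by a single row-major streaming pass that maintains a vector of per-column accumulators, seeded 1 for '*' and 0 for '+' and updated once per row, summed at the end.
import Mathlib
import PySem

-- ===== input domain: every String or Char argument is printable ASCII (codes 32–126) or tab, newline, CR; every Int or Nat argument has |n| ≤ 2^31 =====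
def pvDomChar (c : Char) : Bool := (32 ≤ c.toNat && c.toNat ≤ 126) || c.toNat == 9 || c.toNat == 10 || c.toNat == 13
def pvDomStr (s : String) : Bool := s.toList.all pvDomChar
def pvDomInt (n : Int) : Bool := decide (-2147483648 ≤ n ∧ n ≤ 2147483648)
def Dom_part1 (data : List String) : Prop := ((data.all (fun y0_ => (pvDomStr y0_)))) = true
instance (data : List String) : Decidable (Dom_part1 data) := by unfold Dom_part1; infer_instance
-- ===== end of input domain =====

-- B is a single row-major pass maintaining a vector of per-column accumulators (instead of A's
-- column-major nested loops with indexed reads); equal return value proved on Pre_.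

-- ===== PORT A =====
-- literal transliteration of A: index-driven outer loop over column positions, inner loop over rows
def part1 (data : List String) : Int :=
  let problems := (PySem.List.slice data none (some (-1))).map PySem.Str.split₀
  let operations := PySem.Str.split₀ (PySem.List.pyGetD data ((data.length : Int) - 1) "")
  (PySem.List.pyRange 0 ((problems.headD []).length : Int) 1).foldl (fun total problem =>
    let mult := PySem.List.pyGetD operations problem "" == "*"
    let ans : Int := if mult then 1 else 0
    let ans := problems.foldl (fun ans item =>
      if mult then ans * ((PySem.Int.ofStr? (PySem.List.pyGetD item problem "")).getD 0)
      else ans + ((PySem.Int.ofStr? (PySem.List.pyGetD item problem "")).getD 0)) ans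
    total + ans) 0

-- ===== PORT B =====
-- literal transliteration of Source B: seed one accumulator per column from the operator row,
-- then one fold over the data rows updating the whole vector (Python's zip3 as nested zip);
-- finally sum the vector.
def part1_alt (data : List String) : Int :=
  let rows := (PySem.List.slice data none (some (-1))).map PySem.Str.split₀
  let ops := PySem.Str.split₀ (PySem.List.pyGetD data (-1) "")
  let acc0 : List Int :=
    (PySem.List.slice ops none (some ((PySem.List.pyGetD rows 0 []).length : Int))).map
      (fun op => if op == "*" then (1 : Int) else 0)
  let acc := rows.foldl (fun acc row =>
    (acc.zip (ops.zip row)).map (fun p =>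
      if p.2.1 == "*" then p.1 * ((PySem.Int.ofStr? p.2.2).getD 0)
      else p.1 + ((PySem.Int.ofStr? p.2.2).getD 0))) acc0
  acc.sum

-- ===== PRECONDITION & SPEC =====
-- Pre_ is exactly where Python A returns: at least two lines (else problems[0] / data[-1] raises IndexError),
-- enough operators and long enough rows for every read column index, and every read token parses as an int.
def Pre_part1 (data : List String) : Prop :=
  2 ≤ data.length ∧
  (let rows := data.dropLast.map PySem.Str.split₀
   let ops := PySem.Str.split₀ (data.getD (data.length - 1) "")
   let n := (rows.headD []).length
   n ≤ ops.length ∧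
   ∀ r ∈ rows, n ≤ r.length ∧ ∀ j : Nat, j < n → (PySem.Int.ofStr? (r.getD j "")).isSome)
instance (data : List String) : Decidable (Pre_part1 data) := by unfold Pre_part1; infer_instance

def pvWitness_part1 : List String := ["1 2", "3 4", "+ *"]

def Spec_part1 (data : List String) (out : Int) : Prop := out = part1_alt data
instance (data : List String) (out : Int) : Decidable (Spec_part1 data out) := by unfold Spec_part1; infer_instance

-- ===== CLAIM (what is proved, stated in full; the proofs are below) =====
def Claim_equal_part1 : Prop := ∀ (data : List String), Dom_part1 data → Pre_part1 data → Spec_part1 data (part1 data)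

-- ===== LEMMAS AND PROOFS =====

theorem getD_zero_headD {α : Type} (r : List α) (d : α) : r.getD 0 d = r.headD d := by
  cases r <;> rfl

-- one vector-update step, characterised column-wise
theorem zipmap_range (acc : List Int) (ops row : List String) (w : Nat)
    (f : Int × String × String → Int)
    (ha : acc.length = w) (ho : w ≤ ops.length) (hr : w ≤ row.length) :
    (acc.zip (ops.zip row)).map f
      = (List.range w).map (fun j => f (acc.getD j 0, ops.getD j "", row.getD j "")) := by
  apply List.ext_getElem
  · simp [List.length_zip, ha]; omega
  · intro i h1 h2
    have hi : i < w := by simpa using h2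
    have h3 : i < acc.length := by omega
    have h4 : i < ops.length := by omega
    have h5 : i < row.length := by omega
    simp [List.getElem_zip, h3, h4, h5]

-- the row-major fold over the accumulator vector equals the per-column folds
theorem fold_cols (ops : List String) (w : Nat) (ho : w ≤ ops.length)
    (f : Int × String × String → Int) :
    ∀ (rows : List (List String)) (acc : List Int),
      acc.length = w → (∀ r ∈ rows, w ≤ r.length) →
      rows.foldl (fun acc row => (acc.zip (ops.zip row)).map f) acc
        = (List.range w).map (fun j =>
            rows.foldl (fun a r => f (a, ops.getD j "", r.getD j "")) (acc.getD j 0)) := by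
  intro rows
  induction rows with
  | nil =>
    intro acc ha _
    simp only [List.foldl_nil]
    apply List.ext_getElem
    · simp [ha]
    · intro i h1 h2
      have hi : i < w := by simpa using h2
      simp [h1]
  | cons r rs ih =>
    intro acc ha hrows
    simp only [List.foldl_cons]
    rw [zipmap_range acc ops r w f ha ho (hrows r (by simp))]
    rw [ih _ (by simp) (fun t ht => hrows t (by simp [ht]))]
    apply List.map_congr_left
    intro j hj
    have hj' : j < w := List.mem_range.mp hj
    congr 1
    rw [List.getD_eq_getElem _ _ (by simpa using hj')]
    simp [hj']

-- the seeded accumulator vector, column-wise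
theorem take_map_range (ops : List String) (w : Nat) (ho : w ≤ ops.length)
    (f : String → Int) :
    (ops.take w).map f = (List.range w).map (fun j => f (ops.getD j "")) := by
  apply List.ext_getElem
  · simp; omega
  · intro i h1 h2
    have hi : i < w := by simpa using h2
    have h4 : i < ops.length := by omega
    simp [h4]

-- ===== VERDICT (by name: the statement is the Claim_ definition above) =====
theorem part1_spec : Claim_equal_part1 := by
  intro data _ hpre
  obtain ⟨hlen2, hpre⟩ := hpre
  simp only at hpre
  obtain ⟨hops, hrows⟩ := hpre
  unfold Spec_part1 part1 part1_alt
  simp only [PySem.List.slice_to_neg_one]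
  set rows := data.dropLast.map PySem.Str.split₀ with hrowsdef
  set n := (rows.headD []).length with hn
  -- the two "last line" accesses coincide
  have hlast : PySem.List.pyGetD data ((data.length : Int) - 1) ""
      = PySem.List.pyGetD data (-1) "" := by
    have hne' : data ≠ [] := by intro h; simp [h] at hlen2
    have h1 : PySem.List.pyGetD data (-1) "" = data.getLast hne' :=
      PySem.List.pyGetD_neg_one data "" hne'
    have h2 : ((data.length : Int) - 1) = ((data.length - 1 : Nat) : Int) := by
      have : 1 ≤ data.length := by omega
      omega
    rw [h1, h2, PySem.List.pyGetD_natCast, List.getLast_eq_getElem,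
      List.getD_eq_getElem data "" (by omega)]
  rw [hlast]
  set ops := PySem.Str.split₀ (PySem.List.pyGetD data (-1) "") with hopsdef
  have hopsD : PySem.Str.split₀ (data.getD (data.length - 1) "") = ops := by
    rw [hopsdef]
    congr 1
    rw [← hlast]
    have h2 : ((data.length : Int) - 1) = ((data.length - 1 : Nat) : Int) := by omega
    rw [h2, PySem.List.pyGetD_natCast]
  rw [hopsD] at hops
  -- rows[0] has length n
  have hwidth : (PySem.List.pyGetD rows 0 []).length = n := by
    rw [PySem.List.pyGetD_zero, getD_zero_headD]
  -- B via the two column characterisations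
  have hslice : PySem.List.slice ops none (some ((PySem.List.pyGetD rows 0 []).length : Int))
      = ops.take n := by rw [hwidth]; exact PySem.List.slice_to_natCast ops n
  rw [hslice, take_map_range ops n hops]
  rw [fold_cols ops n hops _ rows _ (by simp) (fun r hr => (hrows r hr).1)]
  -- A as a sum over the same range
  rw [PySem.List.pyRange_zero_natCast]
  rw [List.foldl_map]
  rw [PySem.List.foldl_add (l := List.range n)]
  simp only [zero_add]
  congr 1
  apply List.map_congr_left
  intro j hj
  have hj' : j < n := List.mem_range.mp hj
  simp only [PySem.List.pyGetD_natCast]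
  rw [List.getD_eq_getElem _ (0:Int) (by simp [hj'])]
  simp only [List.getElem_map, List.getElem_range]
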